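-- pv_equiv track=rewrite | github.com/duochen/Python-Beginner | LearnToCodeBySolvingProblems/ch10/coci10c1p2.py | max_consecutive
-- ===== SOURCE A (Python) =====
-- def max_consecutive(desks, grade):
--     """
--     desks is a list of desks; each desk is a list of two grades.
--     grade is a grade to check.
--
--     Return the maximum number of consecutive desks containing grade.
--     """
--     max_students = 0
--     current_students = 0
--     for desk in desks:
--         if desk[0] == grade or desk[1] == grade:
--             current_students = current_students + 1
--             if current_students > max_students:
--                 max_students = current_students
--         else:
--             current_students = 0
--     return max_students
--
-- desks = []
--
-- max_students = 0
-- ===== SOURCE B (Python) =====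
-- def max_consecutive(desks, grade):
--     """
--     desks is a list of desks; each desk is a list of two grades.
--     grade is a grade to check.
--
--     Return the maximum number of consecutive desks containing grade.
--     """
--     best = 0
--     rest = desks
--     while rest:
--         d = rest[0]
--         rest = rest[1:]
--         if d[0] == grade or d[1] == grade:
--             run = 1
--             while rest and (rest[0][0] == grade or rest[0][1] == grade):
--                 run += 1
--                 rest = rest[1:]
--             if run > best:
--                 best = run
--     return best
-- ===== Notes on version B (the rewrite author's own statement) =====
-- stated objective: alternative
-- what changed: Replaces the reset-counter scan (running counter zeroed on misses, max updated inside the loop) by a run-grouping scan: an outer loop that skips misses and, on a hit, an inner loop that consumes the whole consecutive run at once and compares its length to the best.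
import Mathlib
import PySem

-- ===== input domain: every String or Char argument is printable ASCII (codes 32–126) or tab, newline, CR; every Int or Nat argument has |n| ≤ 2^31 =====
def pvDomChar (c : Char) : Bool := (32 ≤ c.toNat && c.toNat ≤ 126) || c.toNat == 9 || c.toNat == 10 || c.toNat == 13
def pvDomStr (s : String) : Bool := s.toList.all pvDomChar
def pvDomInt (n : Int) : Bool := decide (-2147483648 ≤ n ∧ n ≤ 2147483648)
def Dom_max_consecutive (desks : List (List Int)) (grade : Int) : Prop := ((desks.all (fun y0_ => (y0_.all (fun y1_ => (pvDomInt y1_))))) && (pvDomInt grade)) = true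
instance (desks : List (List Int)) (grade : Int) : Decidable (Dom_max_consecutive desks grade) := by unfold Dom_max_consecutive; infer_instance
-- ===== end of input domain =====

-- B replaces A's reset-counter scan by a run-grouping scan (outer loop skips misses,
-- inner loop consumes each whole run); alternative decomposition, same cost.
-- 'desk[0] == grade or desk[1] == grade' (short-circuit): pyGet? none compares unequal;
-- inputs where Python would raise IndexError are excluded by Pre_.

-- ===== PORT A =====
def pvDeskHas (d : List Int) (g : Int) : Bool :=
  (PySem.List.pyGet? d 0 == some g) || (PySem.List.pyGet? d 1 == some g)

def maxConsecGoA (g : Int) : List (List Int) → Int → Int → Int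
  | [], maxS, _ => maxS
  | d :: rest, maxS, cur =>
    if pvDeskHas d g then
      maxConsecGoA g rest (if cur + 1 > maxS then cur + 1 else maxS) (cur + 1)
    else
      maxConsecGoA g rest maxS 0

def max_consecutive (desks : List (List Int)) (grade : Int) : Int :=
  maxConsecGoA grade desks 0 0

-- ===== PORT B =====
-- inner while loop: consume the current run, returning (run, remaining desks)
def pvInnerRun (g : Int) : List (List Int) → Int → Int × List (List Int)
  | [], run => (run, [])
  | d :: rest, run =>
    if pvDeskHas d g then pvInnerRun g rest (run + 1) else (run, d :: rest)

-- used by pvOuterB's termination proof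
theorem pvInnerRun_len (g : Int) : ∀ (xs : List (List Int)) (run : Int),
    (pvInnerRun g xs run).2.length ≤ xs.length := by
  intro xs
  induction xs with
  | nil => intro run; simp [pvInnerRun]
  | cons d rest ih =>
    intro run
    simp only [pvInnerRun]
    split
    · exact Nat.le_succ_of_le (ih (run + 1))
    · simp

-- outer while loop
def pvOuterB (g : Int) : List (List Int) → Int → Int
  | [], best => best
  | d :: rest, best =>
    if pvDeskHas d g then
      let pr := pvInnerRun g rest 1
      pvOuterB g pr.2 (if pr.1 > best then pr.1 else best)
    else
      pvOuterB g rest best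
termination_by xs _ => xs.length
decreasing_by
  · exact Nat.lt_succ_of_le (pvInnerRun_len g rest 1)
  · simp

def max_consecutive_alt (desks : List (List Int)) (grade : Int) : Int :=
  pvOuterB grade desks 0

-- ===== PRECONDITION & SPEC =====
-- Pre_ excludes exactly the inputs where A raises IndexError: some desk is empty, or its
-- first grade misses and it has no second grade (short-circuit evaluates desk[1] only then).
def Pre_max_consecutive (desks : List (List Int)) (grade : Int) : Prop :=
  ∀ d ∈ desks, d ≠ [] ∧ (d.head? = some grade ∨ 2 ≤ d.length)
instance (desks : List (List Int)) (grade : Int) : Decidable (Pre_max_consecutive desks grade) := by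
  unfold Pre_max_consecutive; infer_instance

def pvWitness_max_consecutive : List (List Int) × Int := ([[1, 2], [3, 1], [5]], 5)

def Spec_max_consecutive (desks : List (List Int)) (grade : Int) (out : Int) : Prop := out = max_consecutive_alt desks grade
instance (desks : List (List Int)) (grade : Int) (out : Int) : Decidable (Spec_max_consecutive desks grade out) := by unfold Spec_max_consecutive; infer_instance

-- ===== CLAIM (what is proved, stated in full; the proofs are below) =====
def Claim_equal_max_consecutive : Prop := ∀ (desks : List (List Int)) (grade : Int), Dom_max_consecutive desks grade → Pre_max_consecutive desks grade → Spec_max_consecutive desks grade (max_consecutive desks grade)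

-- ===== LEMMAS AND PROOFS =====

theorem pvInnerRun_ge (g : Int) : ∀ (xs : List (List Int)) (run : Int),
    run ≤ (pvInnerRun g xs run).1 := by
  intro xs
  induction xs with
  | nil => intro run; simp [pvInnerRun]
  | cons d rest ih =>
    intro run
    simp only [pvInnerRun]
    split
    · exact le_trans (by omega) (ih (run + 1))
    · simp

-- Main invariant, by strong induction on length: with counter 0, A's scan equals B's
-- outer loop; and mid-run (counter cur ≤ best), A's scan equals B after consuming the run.
theorem pvBoth (g : Int) : ∀ (n : Nat) (xs : List (List Int)), xs.length ≤ n →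
    ((∀ best, maxConsecGoA g xs best 0 = pvOuterB g xs best) ∧
     (∀ best cur, cur ≤ best → maxConsecGoA g xs best cur =
        pvOuterB g (pvInnerRun g xs cur).2
          (if (pvInnerRun g xs cur).1 > best then (pvInnerRun g xs cur).1 else best))) := by
  intro n
  induction n with
  | zero =>
    intro xs hx
    have : xs = [] := List.length_eq_zero_iff.mp (Nat.le_zero.mp hx)
    subst this
    constructor
    · intro best; simp [maxConsecGoA, pvOuterB]
    · intro best cur hc
      simp only [maxConsecGoA, pvInnerRun, pvOuterB]
      split <;> omega
  | succ n ih =>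
    intro xs hx
    cases xs with
    | nil =>
      constructor
      · intro best; simp [maxConsecGoA, pvOuterB]
      · intro best cur hc
        simp only [maxConsecGoA, pvInnerRun, pvOuterB]
        split <;> omega
    | cons d rest =>
      have hr : rest.length ≤ n := by simpa using Nat.succ_le_succ_iff.mp hx
      obtain ⟨ih1, ih2⟩ := ih rest hr
      constructor
      · intro best
        by_cases hd : pvDeskHas d g = true
        · simp only [maxConsecGoA, pvOuterB, hd, if_pos]
          have hge := pvInnerRun_ge g rest 1
          have h2 := ih2 (if (0 : Int) + 1 > best then 0 + 1 else best) 1 (by split <;> omega)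
          rw [show ((0 : Int) + 1) = 1 by norm_num] at h2 ⊢
          rw [h2]
          congr 1
          split <;> split <;> omega
        · simp only [maxConsecGoA, pvOuterB, hd]
          exact ih1 best
      · intro best cur hc
        by_cases hd : pvDeskHas d g = true
        · simp only [maxConsecGoA, pvInnerRun, hd, if_pos]
          have hge := pvInnerRun_ge g rest (cur + 1)
          have h2 := ih2 (if cur + 1 > best then cur + 1 else best) (cur + 1) (by split <;> omega)
          rw [h2]
          congr 1
          split <;> split <;> omega
        · have hd' : pvDeskHas d g = false := by simpa using hd
          have hbest : (if cur > best then cur else best) = best := by split <;> omega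
          conv_rhs => rw [pvOuterB.eq_def]
          simp only [maxConsecGoA, pvInnerRun, hd', Bool.false_eq_true, if_false, hbest]
          exact ih1 best

-- ===== VERDICT (by name: the statement is the Claim_ definition above) =====
theorem max_consecutive_spec : Claim_equal_max_consecutive := by
  intro desks grade _ _
  unfold Spec_max_consecutive max_consecutive max_consecutive_alt
  exact (pvBoth grade desks.length desks (le_refl _)).1 0
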